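-- pv_equiv track=rewrite | github.com/Zhong-master/PocketSphinx_Speech_Recognition | Speech_Recognition.py | calEnergy
-- ===== SOURCE A (Python) =====
-- def calEnergy(wave_data):
--     energy = []
--     sum = 0
--     for i in range(len(wave_data)):
--         sum = sum + (int(wave_data[i]) * int(wave_data[i]))
--         if (i + 1) % 256 == 0:
--             energy.append(sum)
--             sum = 0
--         elif i == len(wave_data) - 1:
--             energy.append(sum)
--     return energy
-- ===== SOURCE B (Python) =====
-- def calEnergy(wave_data):
--     energy = []
--     for start in range(0, len(wave_data), 256):
--         block = wave_data[start:start + 256]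
--         energy.append(sum(int(x) * int(x) for x in block))
--     return energy
-- ===== Notes on version B (the rewrite author's own statement) =====
-- stated objective: simpler
-- what changed: Replaces A's flat index loop with modulo-256 reset and an elif flush of the last partial block by an outer loop over block starts with a slice and an inner sum per block.
import Mathlib
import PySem

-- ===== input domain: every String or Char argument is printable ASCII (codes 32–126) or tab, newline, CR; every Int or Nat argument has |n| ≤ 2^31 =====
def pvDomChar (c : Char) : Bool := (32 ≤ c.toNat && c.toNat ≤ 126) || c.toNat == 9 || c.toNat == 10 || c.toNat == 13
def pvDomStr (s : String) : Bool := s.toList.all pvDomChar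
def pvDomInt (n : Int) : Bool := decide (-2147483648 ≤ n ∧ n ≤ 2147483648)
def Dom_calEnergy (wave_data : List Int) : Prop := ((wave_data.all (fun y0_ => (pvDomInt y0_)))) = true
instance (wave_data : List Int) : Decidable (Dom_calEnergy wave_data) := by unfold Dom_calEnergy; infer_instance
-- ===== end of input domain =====

-- B replaces A's flat index loop (modulo-256 reset + elif flush) by an outer loop over
-- 256-blocks with a per-block sum; same values, objective: simpler.

-- ===== PORT A =====
-- `for i in range(len(wave_data))` with `wave_data[i]` = iterate over indexed elements
def pvEnum (k : Nat) : List Int → List (Nat × Int)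
  | [] => []
  | x :: xs => (k, x) :: pvEnum (k + 1) xs

def pvStepA (n : Nat) (acc : List Int × Int) (p : Nat × Int) : List Int × Int :=
  let s := acc.2 + p.2 * p.2
  if (p.1 + 1) % 256 = 0 then (acc.1 ++ [s], 0)
  else if p.1 = n - 1 then (acc.1 ++ [s], s)
  else (acc.1, s)

def calEnergy (wave_data : List Int) : List Int :=
  ((pvEnum 0 wave_data).foldl (pvStepA wave_data.length) ([], 0)).1

-- ===== PORT B =====
-- sum(int(x)*int(x) for x in block)
def pvSqSum (l : List Int) : Int := l.foldl (fun s x => s + x * x) 0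

-- the loop over block starts, each block = a 256-slice
def pvChunks (l : List Int) : List Int :=
  if h : l = [] then []
  else pvSqSum (l.take 256) :: pvChunks (l.drop 256)
termination_by l.length
decreasing_by
  cases l with
  | nil => exact absurd rfl h
  | cons a t => simp only [List.length_drop, List.length_cons]; omega

def calEnergy_alt (wave_data : List Int) : List Int := pvChunks wave_data

-- ===== PRECONDITION & SPEC =====
def Spec_calEnergy (wave_data : List Int) (out : List Int) : Prop := out = calEnergy_alt wave_data
instance (wave_data : List Int) (out : List Int) : Decidable (Spec_calEnergy wave_data out) := by unfold Spec_calEnergy; infer_instance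

-- ===== CLAIM (what is proved, stated in full; the proofs are below) =====
def Claim_equal_calEnergy : Prop := ∀ (wave_data : List Int), Dom_calEnergy wave_data → Spec_calEnergy wave_data (calEnergy wave_data)

-- ===== LEMMAS AND PROOFS =====

theorem pvEnum_append (l1 l2 : List Int) (k : Nat) :
    pvEnum k (l1 ++ l2) = pvEnum k l1 ++ pvEnum (k + l1.length) l2 := by
  induction l1 generalizing k with
  | nil => simp [pvEnum]
  | cons x xs ih => simp [pvEnum, ih, Nat.add_assoc, Nat.add_comm 1 xs.length]

theorem pvSqSum_shift (l : List Int) (s : Int) :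
    l.foldl (fun s x => s + x * x) s = s + pvSqSum l := by
  induction l generalizing s with
  | nil => simp [pvSqSum]
  | cons x xs ih =>
    simp only [pvSqSum, List.foldl_cons] at *
    rw [ih, ih (0 + x * x)]
    ring

theorem pvSqSum_append (a b : List Int) : pvSqSum (a ++ b) = pvSqSum a + pvSqSum b := by
  simp only [pvSqSum, List.foldl_append]
  rw [pvSqSum_shift]
  rfl

theorem pvSqSum_cons (x : Int) (xs : List Int) :
    pvSqSum (x :: xs) = x * x + pvSqSum xs := by
  have h := pvSqSum_append [x] xs
  simp only [List.singleton_append] at h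
  rw [h]
  congr 1
  simp [pvSqSum]

-- a run of elements none of which triggers either append branch
theorem run_mid (l : List Int) (k n : Nat) (e : List Int) (s : Int)
    (h : ∀ i, i < l.length → (k + i + 1) % 256 ≠ 0 ∧ k + i ≠ n - 1) :
    (pvEnum k l).foldl (pvStepA n) (e, s) = (e, s + pvSqSum l) := by
  induction l generalizing k s with
  | nil => simp [pvEnum, pvSqSum]
  | cons x xs ih =>
    have h0 := h 0 (by simp)
    simp only [pvEnum, List.foldl_cons, pvStepA]
    rw [if_neg (by simpa using h0.1), if_neg (by simpa using h0.2)]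
    rw [ih (k + 1) (s + x * x) (fun i hi => by
      have := h (i + 1) (by simpa using Nat.succ_lt_succ hi)
      constructor
      · have := this.1; omega
      · have := this.2; omega)]
    rw [pvSqSum_cons, add_assoc]

theorem len_one (l : List Int) (h : l.length = 1) : ∃ y, l = [y] := by
  cases l with
  | nil => simp at h
  | cons a t =>
    cases t with
    | nil => exact ⟨a, rfl⟩
    | cons b u => simp at h

-- one full 256-block: appends the accumulated sum and resets it
theorem run_full (l : List Int) (k n : Nat) (e : List Int) (s : Int)
    (hl : l.length = 256) (hk : k % 256 = 0) (hn : k + 256 ≤ n) :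
    (pvEnum k l).foldl (pvStepA n) (e, s) = (e ++ [s + pvSqSum l], 0) := by
  obtain ⟨y, hy⟩ := len_one (l.drop 255) (by simp [hl])
  have hsplit : l = l.take 255 ++ [y] := by rw [← hy]; simp
  have htk : (l.take 255).length = 255 := by simp [hl]
  rw [hsplit, pvEnum_append, List.foldl_append, htk]
  rw [run_mid _ k n e s (fun i hi => by
    rw [htk] at hi
    constructor <;> omega)]
  simp only [pvEnum, List.foldl_cons, List.foldl_nil, pvStepA]
  rw [if_pos (by omega)]
  rw [pvSqSum_append]
  have hy2 : pvSqSum [y] = y * y := by simp [pvSqSum]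
  rw [hy2, add_assoc]

-- the final partial block (1 ≤ length ≤ 255): the elif flush
theorem run_last (l : List Int) (k n : Nat) (e : List Int) (s : Int)
    (h1 : 1 ≤ l.length) (h2 : l.length ≤ 255) (hk : k % 256 = 0)
    (hn : n = k + l.length) :
    ((pvEnum k l).foldl (pvStepA n) (e, s)).1 = e ++ [s + pvSqSum l] := by
  obtain ⟨y, hy⟩ := len_one (l.drop (l.length - 1)) (by simp; omega)
  have hsplit : l = l.take (l.length - 1) ++ [y] := by rw [← hy]; simp
  have htk : (l.take (l.length - 1)).length = l.length - 1 := by simp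
  conv_lhs => rw [hsplit, pvEnum_append, List.foldl_append, htk]
  rw [run_mid _ k n e s (fun i hi => by
    rw [htk] at hi
    constructor <;> omega)]
  simp only [pvEnum, List.foldl_cons, List.foldl_nil, pvStepA]
  rw [if_neg (by omega), if_pos (by omega)]
  have : pvSqSum l = pvSqSum (l.take (l.length - 1)) + y * y := by
    conv_lhs => rw [hsplit]
    rw [pvSqSum_append]
    simp [pvSqSum]
  rw [this]
  simp [add_assoc]

theorem pvChunks_eq (l : List Int) (h : ¬ l = []) :
    pvChunks l = pvSqSum (l.take 256) :: pvChunks (l.drop 256) := by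
  conv_lhs => rw [pvChunks]
  rw [dif_neg h]

theorem main_loop (m : Nat) (l : List Int) (hm : l.length ≤ m) (k n : Nat) (e : List Int)
    (hk : k % 256 = 0) (hn : n = k + l.length) :
    ((pvEnum k l).foldl (pvStepA n) (e, 0)).1 = e ++ pvChunks l := by
  induction m generalizing l k e with
  | zero =>
    have : l = [] := List.length_eq_zero_iff.mp (by omega)
    subst this
    simp [pvEnum, pvChunks]
  | succ m ih =>
    by_cases hnil : l = []
    · subst hnil; simp [pvEnum, pvChunks]
    · have hpos : 1 ≤ l.length := by
        cases l with
        | nil => exact absurd rfl hnil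
        | cons a t => simp
      by_cases hbig : 256 ≤ l.length
      · have hsplit : l = l.take 256 ++ l.drop 256 := (List.take_append_drop 256 l).symm
        have htk : (l.take 256).length = 256 := by simp; omega
        conv_lhs => rw [hsplit, pvEnum_append, List.foldl_append, htk]
        rw [run_full _ k n e 0 htk hk (by omega)]
        rw [ih (l.drop 256) (by simp; omega) (k + 256) _ (by omega) (by simp; omega)]
        rw [pvChunks_eq l hnil]
        simp
      · rw [run_last l k n e 0 hpos (by omega) hk hn]
        rw [pvChunks_eq l hnil]
        have hd : l.drop 256 = [] := List.drop_eq_nil_of_le (by omega)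
        have ht : l.take 256 = l := List.take_of_length_le (by omega)
        rw [hd, ht]
        simp [pvChunks]

-- ===== VERDICT (by name: the statement is the Claim_ definition above) =====
theorem calEnergy_spec : Claim_equal_calEnergy := by
  intro wave_data _
  unfold Spec_calEnergy calEnergy calEnergy_alt
  have := main_loop wave_data.length wave_data (le_refl _) 0 wave_data.length [] (by omega) (by omega)
  simpa using this
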